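-- pv_equiv track=rewrite | github.com/SabareeshIyer/fpl-predictor | myfpl/methods/computations.py | get_result_by_goal_frequency
-- ===== SOURCE A (Python) =====
-- def get_result_by_goal_frequency(teams_by_goals, number_of_opponents_to_get):
--     interim = {}
--     for k, v in teams_by_goals.items():
--         if v < 0.5 * number_of_opponents_to_get:
--             interim[k] = "Less than 0.5 goals per game"
--         elif v < number_of_opponents_to_get:
--             interim[k] = "0.5-1 goal per game"
--         elif v < 1.5 * number_of_opponents_to_get:
--             interim[k] = "1-1.5 goals per game"
--         elif v < 2 * number_of_opponents_to_get:
--             interim[k] = "1.5-2 goals per game"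
--         else:
--             interim[k] = "More than 2 goals per game"
--
--     reindexed = {}
--     for v in interim.values():
--         reindexed[v] = [key for key in interim.keys() if interim[key] == v]
--         # reindexed[v] = ', '.join(reindexed[v])  # use this for string result
--
--     return reindexed
-- ===== SOURCE B (Python) =====
-- def _label(goals, number_of_opponents_to_get):
--     if 2 * goals < number_of_opponents_to_get:
--         return "Less than 0.5 goals per game"
--     elif goals < number_of_opponents_to_get:
--         return "0.5-1 goal per game"
--     elif 2 * goals < 3 * number_of_opponents_to_get:
--         return "1-1.5 goals per game"
--     elif goals < 2 * number_of_opponents_to_get: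
--         return "1.5-2 goals per game"
--     else:
--         return "More than 2 goals per game"
--
--
-- def get_result_by_goal_frequency(teams_by_goals, number_of_opponents_to_get):
--     groups = {}
--     for team, goals in teams_by_goals.items():
--         groups.setdefault(_label(goals, number_of_opponents_to_get), []).append(team)
--     return groups
-- ===== Notes on version B (the rewrite author's own statement) =====
-- stated objective: faster
-- what changed: Replaces the intermediate team->label dict plus a per-value rescan of all keys with one pass that computes each team's label and appends the team to a dict of label->list via setdefault.
import Mathlib
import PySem

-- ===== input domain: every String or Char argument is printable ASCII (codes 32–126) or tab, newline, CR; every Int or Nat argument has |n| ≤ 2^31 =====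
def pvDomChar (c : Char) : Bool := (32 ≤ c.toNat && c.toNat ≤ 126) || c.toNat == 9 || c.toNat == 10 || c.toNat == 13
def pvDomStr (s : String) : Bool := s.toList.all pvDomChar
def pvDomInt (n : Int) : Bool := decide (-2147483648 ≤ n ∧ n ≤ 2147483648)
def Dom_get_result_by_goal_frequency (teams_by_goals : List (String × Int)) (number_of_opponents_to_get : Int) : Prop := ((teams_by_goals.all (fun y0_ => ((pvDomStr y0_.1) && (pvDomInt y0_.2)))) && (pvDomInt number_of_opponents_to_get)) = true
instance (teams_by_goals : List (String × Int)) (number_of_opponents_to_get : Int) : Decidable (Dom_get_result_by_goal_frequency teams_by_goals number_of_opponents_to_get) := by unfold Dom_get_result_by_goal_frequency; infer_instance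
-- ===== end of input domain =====

-- B replaces A's intermediate team->label dict and its per-value rescan of all keys (O(n^2))
-- by one pass that appends each team to a label->list dict; return values proved equal.
-- Python's float comparisons v < 0.5*n and v < 1.5*n are ported as the integer comparisons
-- 2*v < n and 2*v < 3*n, which are exact for |v|,|n| ≤ 2^31.

-- ===== PORT A =====
def get_result_by_goal_frequency (teams_by_goals : List (String × Int)) (number_of_opponents_to_get : Int) : List (String × List String) :=
  let interim : PySem.Dict String String :=
    (PySem.Dict.ofList teams_by_goals).items.foldl
      (fun d p =>
        if 2 * p.2 < number_of_opponents_to_get then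
          d.insert p.1 "Less than 0.5 goals per game"
        else if p.2 < number_of_opponents_to_get then
          d.insert p.1 "0.5-1 goal per game"
        else if 2 * p.2 < 3 * number_of_opponents_to_get then
          d.insert p.1 "1-1.5 goals per game"
        else if p.2 < 2 * number_of_opponents_to_get then
          d.insert p.1 "1.5-2 goals per game"
        else
          d.insert p.1 "More than 2 goals per game")
      PySem.Dict.empty
  let reindexed : PySem.Dict String (List String) :=
    interim.values.foldl
      (fun r v => r.insert v (interim.keys.filter (fun k => interim.getD k "" == v)))
      PySem.Dict.empty
  reindexed.items

-- ===== PORT B =====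
def grbgf_label (goals number_of_opponents_to_get : Int) : String :=
  if 2 * goals < number_of_opponents_to_get then "Less than 0.5 goals per game"
  else if goals < number_of_opponents_to_get then "0.5-1 goal per game"
  else if 2 * goals < 3 * number_of_opponents_to_get then "1-1.5 goals per game"
  else if goals < 2 * number_of_opponents_to_get then "1.5-2 goals per game"
  else "More than 2 goals per game"

def get_result_by_goal_frequency_alt (teams_by_goals : List (String × Int)) (number_of_opponents_to_get : Int) : List (String × List String) :=
  ((PySem.Dict.ofList teams_by_goals).items.foldl
      (fun g p => g.modify (grbgf_label p.2 number_of_opponents_to_get) [] (· ++ [p.1]))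
      PySem.Dict.empty).items

-- ===== PRECONDITION & SPEC =====
def Spec_get_result_by_goal_frequency (teams_by_goals : List (String × Int)) (number_of_opponents_to_get : Int) (out : List (String × List String)) : Prop := out = get_result_by_goal_frequency_alt teams_by_goals number_of_opponents_to_get
instance (teams_by_goals : List (String × Int)) (number_of_opponents_to_get : Int) (out : List (String × List String)) : Decidable (Spec_get_result_by_goal_frequency teams_by_goals number_of_opponents_to_get out) := by unfold Spec_get_result_by_goal_frequency; infer_instance

-- ===== CLAIM (what is proved, stated in full; the proofs are below) =====
def Claim_equal_get_result_by_goal_frequency : Prop := ∀ (teams_by_goals : List (String × Int)) (number_of_opponents_to_get : Int), Dom_get_result_by_goal_frequency teams_by_goals number_of_opponents_to_get → Spec_get_result_by_goal_frequency teams_by_goals number_of_opponents_to_get (get_result_by_goal_frequency teams_by_goals number_of_opponents_to_get)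

-- ===== LEMMAS AND PROOFS =====

-- a fold of inserts whose value depends only on the key
theorem getD_foldl_insert_const {ν : Type} (F : String → ν) (l : List String)
    (d : PySem.Dict String ν) (lab : String) (d0 : ν) :
    (l.foldl (fun r v => r.insert v (F v)) d).getD lab d0
      = if lab ∈ l then F lab else d.getD lab d0 := by
  induction l generalizing d with
  | nil => simp
  | cons v l ih =>
    simp only [List.foldl_cons, ih, List.mem_cons]
    rcases Decidable.em (lab ∈ l) with h | h
    · simp [h]
    · rcases Decidable.em (lab = v) with hv | hv
      · subst hv
        simp [h, PySem.Dict.getD_insert_self]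
      · have hne : (d.insert v (F v)).getD lab d0 = d.getD lab d0 :=
          PySem.Dict.getD_insert_of_ne d (F v) d0 hv
        simp [h, hv, hne]

theorem get_result_by_goal_frequency_eq (teams_by_goals : List (String × Int)) (n : Int) :
    get_result_by_goal_frequency teams_by_goals n
      = get_result_by_goal_frequency_alt teams_by_goals n := by
  simp only [get_result_by_goal_frequency, get_result_by_goal_frequency_alt]
  have hstep : (fun (d : PySem.Dict String String) (p : String × Int) =>
        if 2 * p.2 < n then d.insert p.1 "Less than 0.5 goals per game"
        else if p.2 < n then d.insert p.1 "0.5-1 goal per game"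
        else if 2 * p.2 < 3 * n then d.insert p.1 "1-1.5 goals per game"
        else if p.2 < 2 * n then d.insert p.1 "1.5-2 goals per game"
        else d.insert p.1 "More than 2 goals per game")
      = (fun d p => d.insert p.1 (grbgf_label p.2 n)) := by
    funext d p
    simp only [grbgf_label]
    split_ifs <;> rfl
  rw [hstep]
  set items0 := (PySem.Dict.ofList teams_by_goals).items with hitems0
  have hkeys0 : (items0.map (fun p => p.1)).Nodup := by
    have := PySem.Dict.nodup_keys_ofList (κ := String) (ν := Int) teams_by_goals
    simpa [PySem.Dict.keys, hitems0] using this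
  -- interim's items
  set interim := items0.foldl (fun d p => d.insert p.1 (grbgf_label p.2 n)) PySem.Dict.empty with hinterim
  have hint : interim.items = items0.map (fun p => (p.1, grbgf_label p.2 n)) := by
    rw [hinterim]
    have := PySem.Dict.items_foldl_insert_fresh items0 (fun p => p.1)
      (fun p => grbgf_label p.2 n) PySem.Dict.empty
      (by intro a _; simp [PySem.Dict.contains_empty]) hkeys0
    simpa [PySem.Dict.empty] using this
  have hintkeys : interim.keys = items0.map (fun p => p.1) := by
    simp [PySem.Dict.keys, hint]
  have hintnodup : interim.keys.Nodup := by rw [hintkeys]; exact hkeys0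
  have hintvals : interim.values = items0.map (fun p => grbgf_label p.2 n) := by
    simp [PySem.Dict.values, hint]
  -- the list A builds for a label equals the filtered key list
  have hF : ∀ lab : String,
      interim.keys.filter (fun k => interim.getD k "" == lab)
        = (items0.filter (fun p => grbgf_label p.2 n == lab)).map (fun p => p.1) := by
    intro lab
    rw [hintkeys, List.filter_map]
    congr 1
    apply List.filter_congr
    intro p hp
    have hmem : (p.1, grbgf_label p.2 n) ∈ interim.items := by
      rw [hint]; exact List.mem_map_of_mem hp
    have := PySem.Dict.getD_of_mem_items interim hmem hintnodup ""
    simp [Function.comp, this]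
  -- A's result
  set reindexed := interim.values.foldl
      (fun r v => r.insert v (interim.keys.filter (fun k => interim.getD k "" == v)))
      PySem.Dict.empty with hreindexed
  have hAkeys : reindexed.keys = PySem.Set.ofList (items0.map (fun p => grbgf_label p.2 n)) := by
    rw [hreindexed,
      PySem.Dict.keys_foldl_insert interim.values
        (fun _ v => interim.keys.filter (fun k => interim.getD k "" == v)) PySem.Dict.empty]
    simp [PySem.Dict.keys, PySem.Dict.empty, PySem.Set.update_nil_left, hintvals]
  have hAnodup : reindexed.keys.Nodup := by
    rw [hreindexed]
    exact PySem.Dict.nodup_keys_foldl_insert _ _ _ (by simp [PySem.Dict.keys, PySem.Dict.empty])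
  have hAgetD : ∀ lab, reindexed.getD lab []
      = if lab ∈ interim.values then interim.keys.filter (fun k => interim.getD k "" == lab) else [] := by
    intro lab
    rw [hreindexed, getD_foldl_insert_const]
    simp [PySem.Dict.getD_empty]
  -- B's result
  set bd := items0.foldl (fun g p => g.modify (grbgf_label p.2 n) [] (fun x => x ++ [p.1])) PySem.Dict.empty with hbd
  have hbd' : bd = (items0.map (fun p => (grbgf_label p.2 n, p.1))).foldl
      (fun d q => d.modify q.1 [] (fun x => x ++ [q.2])) PySem.Dict.empty := by
    rw [hbd, List.foldl_map]
  have hBkeys : bd.keys = PySem.Set.ofList (items0.map (fun p => grbgf_label p.2 n)) := by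
    rw [hbd, PySem.Dict.keys_foldl_modify_key items0 (fun p => grbgf_label p.2 n) []
      (fun _ p => fun x => x ++ [p.1]) PySem.Dict.empty]
    simp [PySem.Dict.keys, PySem.Dict.empty, PySem.Set.update_nil_left]
  have hBnodup : bd.keys.Nodup := by
    rw [hbd]
    exact PySem.Dict.nodup_keys_foldl_modify_key _ _ _ _ _ (by simp [PySem.Dict.keys, PySem.Dict.empty])
  have hBgetD : ∀ lab, bd.getD lab []
      = (items0.filter (fun p => grbgf_label p.2 n == lab)).map (fun p => p.1) := by
    intro lab
    rw [hbd', PySem.Dict.getD_foldl_modify_append]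
    rw [List.filter_map, List.map_map]
    simp [PySem.Dict.getD_empty, Function.comp_def]
  -- both items lists
  rw [PySem.Dict.items_eq_map_keys reindexed hAnodup [],
      PySem.Dict.items_eq_map_keys bd hBnodup [], hAkeys, hBkeys]
  apply List.map_congr_left
  intro lab hlab
  have hmemv : lab ∈ interim.values := by
    rw [hintvals]
    exact (PySem.Set.mem_ofList _ _).1 hlab
  rw [hAgetD, hBgetD, if_pos hmemv, hF]

-- ===== VERDICT (by name: the statement is the Claim_ definition above) =====
theorem get_result_by_goal_frequency_spec : Claim_equal_get_result_by_goal_frequency := by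
  intro tbg n _
  exact get_result_by_goal_frequency_eq tbg n
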